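-- pv_equiv track=rewrite | github.com/ltc1996/Leetcode | Solutions/Solution.py | maxSatisfaction
-- ===== SOURCE A (Python) =====
-- def maxSatisfaction(satisfaction):
--     """
--     :type satisfaction: List[int]
--     :rtype: int
--     """
--     R = 0
--     t = 0
--     satisfaction.sort(reverse=True)
--     for s in satisfaction:
--         t += s
--         N = R + t
--         if N >= R:
--             R = N
--     return R
-- ===== SOURCE B (Python) =====
-- def maxSatisfaction(satisfaction):
--     satisfaction.sort(reverse=True)
--     best = 0
--     for k in range(len(satisfaction) + 1):
--         v = sum(satisfaction[i] * (k - i) for i in range(k))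
--         if v > best:
--             best = v
--     return best
-- ===== Notes on version B (the rewrite author's own statement) =====
-- stated objective: alternative
-- what changed: Replaces A's single greedy pass (conditionally accumulating running prefix sums) with a brute-force evaluation of every cutoff k, recomputing the weighted value sum(s[i]*(k-i)) for each k and taking the maximum.
import Mathlib
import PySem

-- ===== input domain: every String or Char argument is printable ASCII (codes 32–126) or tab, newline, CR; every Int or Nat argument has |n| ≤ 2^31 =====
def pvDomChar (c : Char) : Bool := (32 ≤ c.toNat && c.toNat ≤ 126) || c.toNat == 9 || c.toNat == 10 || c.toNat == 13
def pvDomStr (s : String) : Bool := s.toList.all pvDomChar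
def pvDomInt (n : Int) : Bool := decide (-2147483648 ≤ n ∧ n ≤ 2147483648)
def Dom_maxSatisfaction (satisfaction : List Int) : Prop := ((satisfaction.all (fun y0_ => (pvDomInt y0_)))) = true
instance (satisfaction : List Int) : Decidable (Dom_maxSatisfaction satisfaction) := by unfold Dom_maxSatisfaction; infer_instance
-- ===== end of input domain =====

-- B replaces A's single greedy accumulation with a brute-force evaluation of every cutoff k,
-- tracking the maximum (an alternative algorithm, not a speedup). Both A and B sort the
-- argument in place (descending), so the observable mutation is the same; the equivalence
-- proved here is about the return value.

-- ===== PORT A =====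
def maxSatisfaction (satisfaction : List Int) : Int :=
  -- R = 0; t = 0; satisfaction.sort(reverse=True); for s: t += s; N = R + t; if N >= R: R = N
  let sorted := PySem.List.sorted satisfaction (fun x => x) true
  (sorted.foldl (fun (Rt : Int × Int) s =>
      let t := Rt.2 + s
      let N := Rt.1 + t
      if N ≥ Rt.1 then (N, t) else (Rt.1, t)) (0, 0)).1

-- ===== PORT B =====
def maxSatisfaction_alt (satisfaction : List Int) : Int :=
  let s := PySem.List.sorted satisfaction (fun x => x) true
  (PySem.List.pyRange 0 ((s.length : Int) + 1) 1).foldl (fun best k =>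
    -- v = sum(s[i] * (k - i) for i in range(k)); i < k ≤ len(s), so s[i] is pyGetD s i 0
    let v := (PySem.List.pyRange 0 k 1).foldl
        (fun acc i => acc + PySem.List.pyGetD s i 0 * (k - i)) 0
    if v > best then v else best) 0

-- ===== PRECONDITION & SPEC =====
def Spec_maxSatisfaction (satisfaction : List Int) (out : Int) : Prop := out = maxSatisfaction_alt satisfaction
instance (satisfaction : List Int) (out : Int) : Decidable (Spec_maxSatisfaction satisfaction out) := by unfold Spec_maxSatisfaction; infer_instance

-- ===== CLAIM (what is proved, stated in full; the proofs are below) =====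
def Claim_equal_maxSatisfaction : Prop := ∀ (satisfaction : List Int), Dom_maxSatisfaction satisfaction → Spec_maxSatisfaction satisfaction (maxSatisfaction satisfaction)

-- ===== LEMMAS AND PROOFS =====

-- A's greedy total over a list, with running prefix sum t: adds each new prefix sum clipped at 0
def gsum : List Int → Int → Int
  | [], _ => 0
  | x :: r, t => max (t + x) 0 + gsum r (t + x)

-- B's best cutoff value over a list, with running prefix sum t: max over all prefixes of the
-- sum of the prefix sums (the k = 0 case is the 'max 0')
def bsum : List Int → Int → Int
  | [], _ => 0
  | x :: r, t => max 0 ((t + x) + bsum r (t + x))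

-- prefix sum of the first j entries (getD: past the end contributes 0)
def pre (s : List Int) (j : Nat) : Int := ((List.range j).map (fun i => s.getD i 0)).sum

-- sum of the first k prefix sums, each offset by t
def psums (s : List Int) (t : Int) (k : Nat) : Int := ((List.range k).map (fun j => t + pre s (j + 1))).sum

lemma aFold_eq_gsum : ∀ (l : List Int) (R t : Int),
    (l.foldl (fun (Rt : Int × Int) s =>
      let t := Rt.2 + s
      let N := Rt.1 + t
      if N ≥ Rt.1 then (N, t) else (Rt.1, t)) (R, t)).1 = R + gsum l t := by
  intro l
  induction l with
  | nil => intro R t; simp [gsum]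
  | cons x r ih =>
    intro R t
    simp only [List.foldl_cons, gsum]
    split
    · rw [ih]; omega
    · rw [ih]; omega

lemma bsum_nonneg : ∀ (l : List Int) (t : Int), 0 ≤ bsum l t := by
  intro l
  induction l with
  | nil => intro t; simp [bsum]
  | cons x r ih => intro t; simp only [bsum]; exact le_max_left _ _

lemma gsum_zero_of_neg : ∀ (l : List Int) (t : Int), t < 0 → (∀ x ∈ l, x < 0) → gsum l t = 0 := by
  intro l
  induction l with
  | nil => intro t _ _; simp [gsum]
  | cons x r ih =>
    intro t ht hall
    have hx : x < 0 := hall x (by simp)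
    have h1 : t + x < 0 := by omega
    rw [gsum, ih (t + x) h1 (fun y hy => hall y (by simp [hy]))]
    omega

-- the crux: on a descending list whose running prefix t is a sum of elements no smaller than
-- the head (captured by the invariant '0 ≤ t ∨ all elements negative'), the greedy clipped
-- total equals the best cutoff value
lemma gsum_eq_bsum : ∀ (l : List Int) (t : Int), l.Pairwise (fun a b => b ≤ a) →
    (0 ≤ t ∨ ∀ x ∈ l, x < 0) → gsum l t = bsum l t := by
  intro l
  induction l with
  | nil => intro t _ _; rfl
  | cons x r ih =>
    intro t hp hinv
    have hpr := (List.pairwise_cons.mp hp)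
    by_cases hu : 0 ≤ t + x
    · have := ih (t + x) hpr.2 (Or.inl hu)
      have hb := bsum_nonneg r (t + x)
      rw [gsum, bsum, this]; omega
    · have hneg : ∀ y ∈ r, y < 0 := by
        rcases hinv with h0 | hall
        · intro y hy; have := hpr.1 y hy; omega
        · intro y hy; exact hall y (by simp [hy])
      have hg0 : gsum r (t + x) = 0 := gsum_zero_of_neg r (t + x) (by omega) hneg
      have := ih (t + x) hpr.2 (Or.inr hneg)
      rw [gsum, bsum, ← this, hg0]; omega

lemma pre_cons (x : Int) (r : List Int) (j : Nat) : pre (x :: r) (j + 1) = x + pre r j := by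
  simp [pre, List.range_succ_eq_map, List.map_map, Function.comp_def]

lemma psums_cons (x : Int) (r : List Int) (t : Int) (k : Nat) :
    psums (x :: r) t (k + 1) = (t + x) + psums r (t + x) k := by
  simp only [psums, List.range_succ_eq_map, List.map_cons, List.map_map, List.sum_cons]
  have h1 : pre (x :: r) (0 + 1) = x := by simp [pre]
  rw [h1]
  have h2 : ((List.range k).map ((fun j => t + pre (x :: r) (j + 1)) ∘ Nat.succ)).sum
      = ((List.range k).map (fun j => (t + x) + pre r (j + 1))).sum := by
    refine congrArg List.sum (List.map_congr_left ?_)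
    intro j _
    simp only [Function.comp_def, Nat.succ_eq_add_one]
    rw [show j + 1 + 1 = (j + 1) + 1 from rfl, pre_cons]
    ring
  rw [h2]

-- B's inner sum Σ_{i<k} s[i]·(k−i) regrouped as the sum of the first k prefix sums
lemma inner_eq_psums (s : List Int) : ∀ (k : Nat),
    ((List.range k).map (fun i => s.getD i 0 * ((k : Int) - i))).sum = psums s 0 k := by
  intro k
  induction k with
  | zero => simp [psums]
  | succ k ih =>
    have hpre : pre s (k + 1) = pre s k + s.getD k 0 := by simp [pre, List.range_succ]
    have hps : psums s 0 (k + 1) = psums s 0 k + (0 + pre s (k + 1)) := by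
      simp [psums, List.range_succ]
    rw [List.range_succ, List.map_append, List.sum_append, hps]
    simp only [List.map_singleton, List.sum_singleton]
    have hfun : ((List.range k).map (fun i => s.getD i 0 * (((k : Nat) + 1 : Int) - i))).sum
        = ((List.range k).map (fun i => s.getD i 0 * ((k : Int) - i) + s.getD i 0)).sum := by
      refine congrArg List.sum (List.map_congr_left ?_)
      intro i _; ring
    push_cast
    rw [hfun, PySem.List.sum_map_add_int, ih]
    have : pre s k = ((List.range k).map (fun i => s.getD i 0)).sum := rfl
    push_cast at hpre hps ⊢
    omega

-- B's outer max-tracking fold computes bsum (generalised accumulator a and offset c)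
lemma maxFold_eq_bsum : ∀ (l : List Int) (t a c : Int),
    (List.range (l.length + 1)).foldl (fun b k => max b (c + psums l t k)) a = max a (c + bsum l t) := by
  intro l
  induction l with
  | nil =>
    intro t a c
    simp [psums, bsum, List.range_succ]
  | cons x r ih =>
    intro t a c
    rw [List.length_cons, List.range_succ_eq_map, List.foldl_cons, List.foldl_map]
    simp only [Nat.succ_eq_add_one, psums_cons]
    have h0 : psums (x :: r) t 0 = 0 := by simp [psums]
    rw [h0]
    rw [show (fun (b : Int) (k : Nat) => max b (c + (t + x + psums r (t + x) k)))
        = (fun (b : Int) (k : Nat) => max b ((c + (t + x)) + psums r (t + x) k)) from by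
      funext b k; ring_nf]
    rw [ih (t + x) (max a (c + 0)) (c + (t + x))]
    rw [bsum]
    omega

-- B's inner pyRange fold, written as a list sum
lemma inner_fold_eq (s : List Int) (kn : Nat) :
    (PySem.List.pyRange 0 (kn : Int) 1).foldl
        (fun acc i => acc + PySem.List.pyGetD s i 0 * ((kn : Int) - i)) 0
      = ((List.range kn).map (fun i => s.getD i 0 * ((kn : Int) - i))).sum := by
  rw [PySem.List.pyRange_one, List.foldl_map]
  simp only [sub_zero, Int.toNat_natCast, zero_add, PySem.List.pyGetD_natCast]
  rw [PySem.List.foldl_add]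
  simp

lemma alt_eq_bsum (l : List Int) :
    maxSatisfaction_alt l = bsum (PySem.List.sorted l (fun x => x) true) 0 := by
  simp only [maxSatisfaction_alt]
  rw [PySem.List.pyRange_one, List.foldl_map]
  have hlen : (((PySem.List.sorted l (fun x => x) true).length : Int) + 1 - 0).toNat
      = (PySem.List.sorted l (fun x => x) true).length + 1 := by omega
  rw [hlen]
  have hfun : (fun (best : Int) (k : Nat) =>
      (fun (best : Int) (k : Int) =>
        let v := (PySem.List.pyRange 0 k 1).foldl
          (fun acc i => acc + PySem.List.pyGetD (PySem.List.sorted l (fun x => x) true) i 0 * (k - i)) 0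
        if v > best then v else best) best (0 + (k : Int)))
      = (fun (b : Int) (k : Nat) =>
          max b (0 + psums (PySem.List.sorted l (fun x => x) true) 0 k)) := by
    funext b k
    simp only [zero_add]
    rw [inner_fold_eq, inner_eq_psums]
    rcases le_or_gt (psums (PySem.List.sorted l (fun x => x) true) 0 k) b with h | h
    · rw [if_neg (by omega)]; omega
    · rw [if_pos (by omega)]; omega
  rw [hfun, maxFold_eq_bsum]
  have := bsum_nonneg (PySem.List.sorted l (fun x => x) true) 0
  omega

-- ===== VERDICT (by name: the statement is the Claim_ definition above) =====
theorem maxSatisfaction_spec : Claim_equal_maxSatisfaction := by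
  intro l _
  show maxSatisfaction l = maxSatisfaction_alt l
  rw [alt_eq_bsum]
  simp only [maxSatisfaction]
  rw [aFold_eq_gsum]
  rw [← gsum_eq_bsum _ 0 (PySem.List.sorted_pairwise_rev l (fun x => x)) (Or.inl le_rfl)]
  omega
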